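-- pv_equiv track=rewrite | github.com/caulif/ae_prepare | util/crypto/secretsharing/simple_sharing.py | reconstruct_secret
-- ===== SOURCE A (Python) =====
-- def reconstruct_secret(shares, prime):
--     """
--     从份额中重建秘密。
--
--     Args:
--         shares: 份额列表，每个份额是一个元组 (x, y)
--         prime: 用于计算的素数
--
--     Returns:
--         secret: 重建的秘密
--     """
--     if len(shares) < 2:
--         raise ValueError("至少需要2个份额才能重建秘密")
--
--     # 使用拉格朗日插值重建秘密
--     x_coords = [x for x, _ in shares]
--     y_coords = [y for _, y in shares]
--
--     def basis_polynomial(j, x):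
--         numerator = denominator = 1
--         for m in range(len(x_coords)):
--             if m != j:
--                 numerator = (numerator * (x - x_coords[m])) % prime
--                 denominator = (denominator * (x_coords[j] - x_coords[m])) % prime
--         return (numerator * pow(denominator, -1, prime)) % prime
--
--     # 计算在x=0处的值
--     secret = 0
--     for j in range(len(shares)):
--         secret = (secret + y_coords[j] * basis_polynomial(j, 0)) % prime
--
--     return secret
-- ===== SOURCE B (Python) =====
-- def reconstruct_secret(shares, prime):
--     if len(shares) < 2:
--         raise ValueError("至少需要2个份额才能重建秘密")
--     xs = [x for x, _ in shares]
--     n = len(xs)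
--     # prefix/suffix running products of (0 - x_m) mod prime:
--     # the Lagrange numerator at x=0 for share j is npre[j] * nsuf[j+1].
--     npre = [1] * (n + 1)
--     for i in range(n):
--         npre[i + 1] = npre[i] * (0 - xs[i]) % prime
--     nsuf = [1] * (n + 1)
--     for i in range(n - 1, -1, -1):
--         nsuf[i] = nsuf[i + 1] * (0 - xs[i]) % prime
--     # per-share denominators
--     dens = []
--     for j in range(n):
--         d = 1
--         for m in range(n):
--             if m != j:
--                 d = d * (xs[j] - xs[m]) % prime
--         dens.append(d)
--     # batch inversion (Montgomery's trick): a single modular inverse of the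
--     # product of all denominators, recovered per share with prefix/suffix products
--     dpre = [1] * (n + 1)
--     for i in range(n):
--         dpre[i + 1] = dpre[i] * dens[i] % prime
--     dsuf = [1] * (n + 1)
--     for i in range(n - 1, -1, -1):
--         dsuf[i] = dsuf[i + 1] * dens[i] % prime
--     inv_all = pow(dpre[n], -1, prime)
--     secret = 0
--     for j in range(n):
--         inv_j = inv_all * dpre[j] % prime * dsuf[j + 1] % prime
--         num_j = npre[j] * nsuf[j + 1] % prime
--         secret = (secret + shares[j][1] * (num_j * inv_j % prime)) % prime
--     return secret
-- ===== Notes on version B (the rewrite author's own statement) =====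
-- stated objective: faster
-- what changed: Replaces the per-share Lagrange basis evaluation (each share re-scanning all shares for its numerator and paying its own modular inverse) by prefix/suffix running products of (0 - x_m) for all numerators at once and Montgomery batch inversion: one single pow(.,-1,prime) on the product of all denominators, each per-share inverse recovered from prefix/suffix products of the denominators.
import Mathlib
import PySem

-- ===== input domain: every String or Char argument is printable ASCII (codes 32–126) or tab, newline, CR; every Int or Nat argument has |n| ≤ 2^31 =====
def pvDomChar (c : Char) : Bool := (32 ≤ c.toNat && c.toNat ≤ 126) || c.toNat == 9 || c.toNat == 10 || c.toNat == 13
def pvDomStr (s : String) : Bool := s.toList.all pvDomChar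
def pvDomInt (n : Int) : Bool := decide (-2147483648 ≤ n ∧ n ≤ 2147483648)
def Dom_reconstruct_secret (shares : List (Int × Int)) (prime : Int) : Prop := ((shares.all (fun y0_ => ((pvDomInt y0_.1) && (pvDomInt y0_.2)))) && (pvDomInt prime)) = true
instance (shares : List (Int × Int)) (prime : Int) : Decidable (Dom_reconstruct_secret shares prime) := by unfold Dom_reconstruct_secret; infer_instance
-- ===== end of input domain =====

-- B replaces A's per-share Lagrange numerator rescans and per-share modular inverses by prefix/suffix
-- running products and a single batch inversion (Montgomery's trick); a timing run measures the speedup.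

-- Port of Python's pow(d, -1, p): exact where p ≠ 0 and Int.gcd d p = 1 (the inverse is unique in the
-- residue range of p); Pre_ guarantees that at every use.  Shared by both ports.
def pyInvMod (d p : Int) : Int := PySem.Int.mod (Int.gcdA d p) p

-- ===== PORT A =====
-- The len(shares) < 2 guard raises ValueError; those inputs are outside Pre_ below.
def reconstruct_secret (shares : List (Int × Int)) (prime : Int) : Int :=
  let x_coords := shares.map Prod.fst
  let y_coords := shares.map Prod.snd
  let n := x_coords.length
  let basis_polynomial := fun (j : Nat) (x : Int) =>
    let nd := (List.range n).foldl
      (fun (s : Int × Int) m =>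
        if m ≠ j then
          (PySem.Int.mod (s.1 * (x - x_coords.getD m 0)) prime,
           PySem.Int.mod (s.2 * (x_coords.getD j 0 - x_coords.getD m 0)) prime)
        else s) (1, 1)
    PySem.Int.mod (nd.1 * pyInvMod nd.2 prime) prime
  (List.range shares.length).foldl
    (fun secret j => PySem.Int.mod (secret + y_coords.getD j 0 * basis_polynomial j 0) prime) 0

-- ===== PORT B =====
-- the running-product loops of Source B (npre / nsuf / dpre / dsuf): element i+1 = element i * x_i mod p
def prefixProds (p : Int) : List Int → Int → List Int
  | [], a => [a]
  | x :: t, a => a :: prefixProds p t (PySem.Int.mod (a * x) p)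

def reconstruct_secret_alt (shares : List (Int × Int)) (prime : Int) : Int :=
  let xs := shares.map Prod.fst
  let n := xs.length
  let negs := xs.map (fun x => 0 - x)
  let npre := prefixProds prime negs 1
  let nsuf := (prefixProds prime negs.reverse 1).reverse
  let dens := (List.range n).map (fun j =>
    (List.range n).foldl (fun d m =>
      if m ≠ j then PySem.Int.mod (d * (xs.getD j 0 - xs.getD m 0)) prime else d) 1)
  let dpre := prefixProds prime dens 1
  let dsuf := (prefixProds prime dens.reverse 1).reverse
  let inv_all := pyInvMod (dpre.getD n 0) prime
  (List.range n).foldl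
    (fun secret j =>
      let inv_j := PySem.Int.mod (PySem.Int.mod (inv_all * dpre.getD j 0) prime * dsuf.getD (j+1) 0) prime
      let num_j := PySem.Int.mod (npre.getD j 0 * nsuf.getD (j+1) 0) prime
      PySem.Int.mod (secret + (shares.getD j (0,0)).2 * PySem.Int.mod (num_j * inv_j) prime) prime) 0

-- ===== PRECONDITION & SPEC =====
-- Pre_ = exactly the inputs on which the Python A returns: prime ≠ 0 (no ZeroDivisionError),
-- at least two shares (no ValueError guard), and every Lagrange denominator product invertible
-- mod prime (pow(d, -1, prime) raises ValueError otherwise).  B raises on exactly the same inputs.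
def Pre_reconstruct_secret (shares : List (Int × Int)) (prime : Int) : Prop :=
  prime ≠ 0 ∧ 2 ≤ shares.length ∧
  ∀ j < shares.length,
    Int.gcd ((((List.range shares.length).filter (fun m => m ≠ j)).map
      (fun m => (shares.map Prod.fst).getD j 0 - (shares.map Prod.fst).getD m 0)).prod) prime = 1
instance (shares : List (Int × Int)) (prime : Int) : Decidable (Pre_reconstruct_secret shares prime) := by
  unfold Pre_reconstruct_secret; infer_instance

def pvWitness_reconstruct_secret : (List (Int × Int)) × Int := ([(1, 5), (2, 7)], 11)

def Spec_reconstruct_secret (shares : List (Int × Int)) (prime : Int) (out : Int) : Prop := out = reconstruct_secret_alt shares prime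
instance (shares : List (Int × Int)) (prime : Int) (out : Int) : Decidable (Spec_reconstruct_secret shares prime out) := by unfold Spec_reconstruct_secret; infer_instance

-- ===== CLAIM (what is proved, stated in full; the proofs are below) =====
def Claim_equal_reconstruct_secret : Prop := ∀ (shares : List (Int × Int)) (prime : Int), Dom_reconstruct_secret shares prime → Pre_reconstruct_secret shares prime → Spec_reconstruct_secret shares prime (reconstruct_secret shares prime)

-- ===== LEMMAS AND PROOFS =====

theorem pymod_modEq (a p : Int) : PySem.Int.mod a p ≡ a [ZMOD p] :=
  (Int.modEq_iff_dvd.mpr ⟨-PySem.Int.floordiv a p,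
    by have := PySem.Int.floordiv_mul_add_mod a p; linarith [mul_comm p (PySem.Int.floordiv a p)]⟩).symm

theorem modEq_iff_cast {a b p : Int} : a ≡ b [ZMOD p] ↔ ((a : ZMod p.natAbs) = (b : ZMod p.natAbs)) := by
  rw [ZMod.intCast_eq_intCast_iff']
  constructor
  · intro h
    exact Int.modEq_iff_dvd.mpr ((Int.natAbs_dvd).mpr (Int.modEq_iff_dvd.mp h))
  · intro h
    exact Int.modEq_iff_dvd.mpr ((Int.natAbs_dvd).mp (Int.modEq_iff_dvd.mp h))

theorem cast_pymod (a p : Int) : ((PySem.Int.mod a p : Int) : ZMod p.natAbs) = (a : ZMod p.natAbs) :=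
  modEq_iff_cast.mp (pymod_modEq a p)

theorem pymod_eq_of_cast {a b p : Int} (hp : p ≠ 0)
    (h : (a : ZMod p.natAbs) = (b : ZMod p.natAbs)) :
    PySem.Int.mod a p = PySem.Int.mod b p := by
  have hc : PySem.Int.mod a p ≡ PySem.Int.mod b p [ZMOD p] :=
    ((pymod_modEq a p).trans (modEq_iff_cast.mpr h)).trans (pymod_modEq b p).symm
  have hd : p ∣ PySem.Int.mod b p - PySem.Int.mod a p := Int.ModEq.dvd hc
  have hz : PySem.Int.mod b p - PySem.Int.mod a p = 0 := by
    apply Int.eq_zero_of_dvd_of_natAbs_lt_natAbs hd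
    rcases lt_or_gt_of_ne hp with hneg | hpos
    · have b1 := PySem.Int.mod_neg_bounds a hneg
      have b2 := PySem.Int.mod_neg_bounds b hneg
      omega
    · have a1 := PySem.Int.mod_nonneg a hpos
      have a2 := PySem.Int.mod_lt a hpos
      have b1 := PySem.Int.mod_nonneg b hpos
      have b2 := PySem.Int.mod_lt b hpos
      omega
  omega

theorem gcd_eq_of_cast {a b p : Int} (h : (a : ZMod p.natAbs) = (b : ZMod p.natAbs)) :
    Int.gcd a p = Int.gcd b p := by
  obtain ⟨k, hk⟩ := Int.modEq_iff_dvd.mp (modEq_iff_cast.mpr h)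
  have hb : b = a + p * k := by linarith
  rw [hb]
  exact (Int.gcd_add_mul_left_left p a k).symm

theorem pyInvMod_cast {d p : Int} (h : Int.gcd d p = 1) :
    (d : ZMod p.natAbs) * ((pyInvMod d p : Int) : ZMod p.natAbs) = 1 := by
  rw [pyInvMod, cast_pymod]
  have hg := Int.gcd_eq_gcd_ab d p
  rw [h] at hg
  have h1 : d * Int.gcdA d p ≡ 1 [ZMOD p] :=
    (Int.modEq_iff_dvd.mpr ⟨-Int.gcdB d p,
      by push_cast at hg; linarith [mul_comm p (Int.gcdB d p), mul_comm p (-Int.gcdB d p)]⟩).symm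
  have h2 := modEq_iff_cast.mp h1
  push_cast at h2 ⊢
  exact h2

theorem prefixProds_length (p : Int) : ∀ (l : List Int) (a : Int), (prefixProds p l a).length = l.length + 1 := by
  intro l
  induction l with
  | nil => intro a; rfl
  | cons x t ih => intro a; simp [prefixProds, ih]

theorem prefixProds_getD (p : Int) :
    ∀ (l : List Int) (a : Int) (j : Nat), j ≤ l.length →
    (prefixProds p l a).getD j 0 = (l.take j).foldl (fun s x => PySem.Int.mod (s * x) p) a := by
  intro l
  induction l with
  | nil =>
    intro a j hj
    have : j = 0 := by simpa using hj
    simp [this, prefixProds]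
  | cons x t ih =>
    intro a j hj
    cases j with
    | zero => simp [prefixProds]
    | succ k => simpa [prefixProds] using ih (PySem.Int.mod (a * x) p) k (by simpa using hj)

theorem cast_foldl_mod (p : Int) :
    ∀ (l : List Int) (a : Int),
    ((l.foldl (fun s x => PySem.Int.mod (s * x) p) a : Int) : ZMod p.natAbs) =
      (a : ZMod p.natAbs) * (l.map (Int.cast : Int → ZMod p.natAbs)).prod := by
  intro l
  induction l with
  | nil => intro a; simp
  | cons x t ih =>
    intro a
    rw [List.foldl_cons, ih, cast_pymod, List.map_cons, List.prod_cons]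
    push_cast
    ring

theorem cast_foldl_skip (p : Int) (j : Nat) (g : Nat → Int) :
    ∀ (l : List Nat) (a : Int),
    ((l.foldl (fun s m => if m ≠ j then PySem.Int.mod (s * g m) p else s) a : Int) : ZMod p.natAbs) =
      (a : ZMod p.natAbs) * ((l.filter (fun m => m ≠ j)).map (fun m => ((g m : Int) : ZMod p.natAbs))).prod := by
  intro l
  induction l with
  | nil => intro a; simp
  | cons x t ih =>
    intro a
    by_cases hx : x ≠ j
    · rw [List.foldl_cons, if_pos hx, ih, cast_pymod, List.filter_cons_of_pos (by simpa using hx),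
        List.map_cons, List.prod_cons]
      push_cast
      ring
    · rw [List.foldl_cons, if_neg hx, ih, List.filter_cons_of_neg (by simpa using hx)]

theorem foldl_pair_split (j : Nat) (f g : Int → Nat → Int) :
    ∀ (l : List Nat) (a b : Int),
    l.foldl (fun (s : Int × Int) m => if m ≠ j then (f s.1 m, g s.2 m) else s) (a, b) =
      (l.foldl (fun s m => if m ≠ j then f s m else s) a,
       l.foldl (fun s m => if m ≠ j then g s m else s) b) := by
  intro l
  induction l with
  | nil => intro a b; rfl
  | cons x t ih =>
    intro a b
    rw [List.foldl_cons, List.foldl_cons, List.foldl_cons]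
    by_cases hx : x ≠ j
    · rw [if_pos hx, if_pos hx, if_pos hx]; exact ih _ _
    · rw [if_neg hx, if_neg hx, if_neg hx]; exact ih _ _

theorem range_filter_ne (n j : Nat) (hj : j < n) :
    (List.range n).filter (fun m => m ≠ j) = List.range j ++ List.range' (j+1) (n-j-1) := by
  have h1 : List.range n = List.range' 0 (j+1) ++ List.range' (j+1) (n-j-1) := by
    have := @List.range'_append 0 (j+1) (n-j-1) 1
    simp only [one_mul, Nat.zero_add] at this
    rw [this, List.range_eq_range']
    congr 1
    omega
  rw [h1, List.filter_append]
  have h2 : List.range' 0 (j+1) = List.range' 0 j ++ [j] := by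
    simpa using @List.range'_1_concat 0 j
  rw [h2, List.filter_append]
  have e1 : (List.range' 0 j).filter (fun m => m ≠ j) = List.range' 0 j := by
    apply List.filter_eq_self.mpr
    intro m hm
    have := List.mem_range'.mp hm
    simp; omega
  have e2 : ([j].filter (fun m => m ≠ j)) = [] := by simp
  have e3 : (List.range' (j+1) (n-j-1)).filter (fun m => m ≠ j) = List.range' (j+1) (n-j-1) := by
    apply List.filter_eq_self.mpr
    intro m hm
    have := List.mem_range'.mp hm
    simp; omega
  rw [e1, e2, e3, ← List.range_eq_range']
  simp

theorem map_getD_range' (l : List Int) :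
    ∀ (k s : Nat), s + k ≤ l.length →
    (List.range' s k).map (fun m => l.getD m 0) = (l.drop s).take k := by
  intro k
  induction k with
  | zero => intro s _; simp
  | succ k ih =>
    intro s hs
    rw [List.range'_succ, List.map_cons, ih (s+1) (by omega)]
    rw [List.getD_eq_getElem l 0 (by omega : s < l.length)]
    rw [List.drop_eq_getElem_cons (by omega : s < l.length), List.take_cons (by omega : 0 < k+1)]
    simp

theorem gcd_mul_one (a b p : Int) (ha : Int.gcd a p = 1) (hb : Int.gcd b p = 1) :
    Int.gcd (a * b) p = 1 := by
  rw [Int.gcd] at *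
  rw [Int.natAbs_mul]
  exact Nat.Coprime.mul_left ha hb

theorem gcd_list_prod (p : Int) :
    ∀ (l : List Int), (∀ x ∈ l, Int.gcd x p = 1) → Int.gcd l.prod p = 1 := by
  intro l
  induction l with
  | nil => intro _; simp
  | cons x t ih =>
    intro h
    rw [List.prod_cons]
    exact gcd_mul_one _ _ _ (h x (by simp)) (ih (fun y hy => h y (by simp [hy])))

-- prefix/suffix indexing lemmas, in cast form
theorem prefix_cast (p : Int) (l : List Int) (j : Nat) (hj : j ≤ l.length) :
    (((prefixProds p l 1).getD j 0 : Int) : ZMod p.natAbs) =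
      ((l.take j).map (Int.cast : Int → ZMod p.natAbs)).prod := by
  rw [prefixProds_getD p l 1 j hj, cast_foldl_mod]
  simp

theorem suffix_cast (p : Int) (l : List Int) (i : Nat) (hi : i ≤ l.length) :
    ((((prefixProds p l.reverse 1).reverse).getD i 0 : Int) : ZMod p.natAbs) =
      ((l.drop i).map (Int.cast : Int → ZMod p.natAbs)).prod := by
  have hlen : (prefixProds p l.reverse 1).length = l.length + 1 := by
    rw [prefixProds_length]; simp
  have hi' : i < (prefixProds p l.reverse 1).reverse.length := by
    rw [List.length_reverse, hlen]; omega
  rw [List.getD_eq_getElem _ _ hi', List.getElem_reverse]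
  have hidx : (prefixProds p l.reverse 1).length - 1 - i = l.length - i := by omega
  simp only [hidx]
  rw [← List.getD_eq_getElem _ 0 (by rw [hlen]; omega)]
  rw [prefixProds_getD p l.reverse 1 (l.length - i) (by rw [List.length_reverse]; omega)]
  rw [cast_foldl_mod]
  have htk : l.reverse.take (l.length - i) = (l.drop i).reverse := List.reverse_drop.symm
  rw [htk, List.map_reverse, List.prod_reverse]
  simp

-- A's skip-fold over getD, split as take/drop products
theorem skipfold_cast_take_drop (p : Int) (l : List Int) (j : Nat) (hj : j < l.length) :
    (((List.range l.length).foldl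
        (fun s m => if m ≠ j then PySem.Int.mod (s * l.getD m 0) p else s) 1 : Int) : ZMod p.natAbs) =
      ((l.take j).map (Int.cast : Int → ZMod p.natAbs)).prod *
      ((l.drop (j+1)).map (Int.cast : Int → ZMod p.natAbs)).prod := by
  rw [cast_foldl_skip, range_filter_ne _ j hj, List.map_append, List.prod_append]
  have e1 : (List.range j).map (fun m => ((l.getD m 0 : Int) : ZMod p.natAbs)) =
      (l.take j).map (Int.cast : Int → ZMod p.natAbs) := by
    rw [show (fun m => ((l.getD m 0 : Int) : ZMod p.natAbs)) =
        (Int.cast : Int → ZMod p.natAbs) ∘ (fun m => l.getD m 0) from rfl, ← List.map_map]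
    rw [List.range_eq_range', map_getD_range' l j 0 (by omega), List.drop_zero]
  have e2 : (List.range' (j+1) (l.length-j-1)).map (fun m => ((l.getD m 0 : Int) : ZMod p.natAbs)) =
      (l.drop (j+1)).map (Int.cast : Int → ZMod p.natAbs) := by
    rw [show (fun m => ((l.getD m 0 : Int) : ZMod p.natAbs)) =
        (Int.cast : Int → ZMod p.natAbs) ∘ (fun m => l.getD m 0) from rfl, ← List.map_map]
    rw [map_getD_range' l (l.length-j-1) (j+1) (by omega)]
    rw [List.take_of_length_le (by rw [List.length_drop]; omega)]
  rw [e1, e2]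
  push_cast
  ring

-- A's skip-fold in cast form, as the cast of the plain filtered product (for gcd transport)
theorem skipfold_cast_filter (p : Int) (j n : Nat) (g : Nat → Int) :
    (((List.range n).foldl
        (fun s m => if m ≠ j then PySem.Int.mod (s * g m) p else s) 1 : Int) : ZMod p.natAbs) =
      (((((List.range n).filter (fun m => m ≠ j)).map g).prod : Int) : ZMod p.natAbs) := by
  rw [cast_foldl_skip]
  rw [show ((((((List.range n).filter (fun m => m ≠ j)).map g).prod : Int)) : ZMod p.natAbs) =
      ((((List.range n).filter (fun m => m ≠ j)).map g).map (Int.cast : Int → ZMod p.natAbs)).prod from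
    ((Int.castRingHom (ZMod p.natAbs)).map_list_prod _)]
  rw [List.map_map]
  simp [Function.comp_def]


theorem negs_getD (xs : List Int) (m : Nat) :
    (xs.map (fun x => 0 - x)).getD m 0 = 0 - xs.getD m 0 := by
  simpa using List.getD_map xs 0 (n := m) (fun x => 0 - x)

-- the per-share term of A equals the per-share term of B
theorem basis_eq (p : Int) (hp : p ≠ 0) (xs : List Int) (n : Nat) (hn : xs.length = n)
    (negs dens : List Int)
    (hnegs : negs = xs.map (fun x => 0 - x))
    (hdens : dens = (List.range n).map (fun k =>
        (List.range n).foldl (fun d m =>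
          if m ≠ k then PySem.Int.mod (d * (xs.getD k 0 - xs.getD m 0)) p else d) 1))
    (j : Nat) (hj : j < n)
    (hg : ∀ k, k < n → Int.gcd ((((List.range n).filter (fun m => m ≠ k)).map
          (fun m => xs.getD k 0 - xs.getD m 0)).prod) p = 1) :
    PySem.Int.mod
      (((List.range n).foldl (fun (s : Int × Int) m => if m ≠ j then
            (PySem.Int.mod (s.1 * (0 - xs.getD m 0)) p,
             PySem.Int.mod (s.2 * (xs.getD j 0 - xs.getD m 0)) p) else s) (1,1)).1 *
        pyInvMod (((List.range n).foldl (fun (s : Int × Int) m => if m ≠ j then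
            (PySem.Int.mod (s.1 * (0 - xs.getD m 0)) p,
             PySem.Int.mod (s.2 * (xs.getD j 0 - xs.getD m 0)) p) else s) (1,1)).2) p) p
    = PySem.Int.mod
        (PySem.Int.mod ((prefixProds p negs 1).getD j 0 *
           ((prefixProds p negs.reverse 1).reverse).getD (j+1) 0) p *
         PySem.Int.mod (PySem.Int.mod (pyInvMod ((prefixProds p dens 1).getD n 0) p *
             (prefixProds p dens 1).getD j 0) p *
           ((prefixProds p dens.reverse 1).reverse).getD (j+1) 0) p) p := by
  subst hn
  rw [foldl_pair_split j
    (fun a m => PySem.Int.mod (a * (0 - xs.getD m 0)) p)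
    (fun a m => PySem.Int.mod (a * (xs.getD j 0 - xs.getD m 0)) p)]
  apply pymod_eq_of_cast hp
  -- names for the pieces
  have hnl : negs.length = xs.length := by rw [hnegs]; simp
  have hdl : dens.length = xs.length := by rw [hdens]; simp
  -- A's numerator, as take/drop products over negs
  have hnumA : ((((List.range xs.length).foldl
        (fun s m => if m ≠ j then PySem.Int.mod (s * (0 - xs.getD m 0)) p else s) 1 : Int)) : ZMod p.natAbs) =
      ((negs.take j).map (Int.cast : Int → ZMod p.natAbs)).prod *
      ((negs.drop (j+1)).map (Int.cast : Int → ZMod p.natAbs)).prod := by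
    have hfun : (fun (s : Int) m => if m ≠ j then PySem.Int.mod (s * (0 - xs.getD m 0)) p else s) =
        (fun (s : Int) m => if m ≠ j then PySem.Int.mod (s * negs.getD m 0) p else s) := by
      funext s m
      rw [hnegs, negs_getD]
    rw [hfun, show xs.length = negs.length from hnl.symm]
    exact skipfold_cast_take_drop p negs j (by omega)
  -- the denominator folds are the entries of dens, and each is coprime to p
  have hdenF : ∀ k, k < xs.length → dens.getD k 0 =
      (List.range xs.length).foldl (fun d m =>
        if m ≠ k then PySem.Int.mod (d * (xs.getD k 0 - xs.getD m 0)) p else d) 1 := by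
    intro k hk
    rw [hdens, List.getD_eq_getElem _ 0 (by simpa using hk), List.getElem_map, List.getElem_range]
  have hdgcd : ∀ k, k < xs.length → Int.gcd (dens.getD k 0) p = 1 := by
    intro k hk
    rw [hdenF k hk]
    rw [gcd_eq_of_cast (skipfold_cast_filter p k xs.length (fun m => xs.getD k 0 - xs.getD m 0))]
    exact hg k hk
  -- the product of all of dens, and its inverse
  have hDcast : (((prefixProds p dens 1).getD xs.length 0 : Int) : ZMod p.natAbs) =
      (dens.map (Int.cast : Int → ZMod p.natAbs)).prod := by
    rw [prefix_cast p dens xs.length (by omega), List.take_of_length_le (by omega)]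
  have hDgcd : Int.gcd ((prefixProds p dens 1).getD xs.length 0) p = 1 := by
    rw [gcd_eq_of_cast (b := dens.prod) (by rw [hDcast]; push_cast; rfl)]
    refine gcd_list_prod p dens ?_
    intro x hx
    obtain ⟨k, hk, rfl⟩ := List.mem_iff_getElem.mp hx
    rw [← List.getD_eq_getElem _ 0 hk]
    exact hdgcd k (by omega)
  have e2 : (dens.map (Int.cast : Int → ZMod p.natAbs)).prod *
      ((pyInvMod ((prefixProds p dens 1).getD xs.length 0) p : Int) : ZMod p.natAbs) = 1 := by
    rw [← hDcast]
    exact pyInvMod_cast hDgcd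
  have e1 : ((dens.getD j 0 : Int) : ZMod p.natAbs) *
      ((pyInvMod (dens.getD j 0) p : Int) : ZMod p.natAbs) = 1 :=
    pyInvMod_cast (hdgcd j (by omega))
  -- split the product of dens at j
  have hsplit : (dens.map (Int.cast : Int → ZMod p.natAbs)).prod =
      ((dens.take j).map (Int.cast : Int → ZMod p.natAbs)).prod *
      (((dens.getD j 0 : Int) : ZMod p.natAbs) *
       ((dens.drop (j+1)).map (Int.cast : Int → ZMod p.natAbs)).prod) := by
    conv_lhs => rw [← List.take_append_drop j dens]
    rw [List.map_append, List.prod_append]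
    rw [List.drop_eq_getElem_cons (by omega : j < dens.length), List.map_cons, List.prod_cons]
    rw [← List.getD_eq_getElem _ 0 (by omega : j < dens.length)]
  -- the prefix/suffix entries
  have hT1 := prefix_cast p negs j (by omega)
  have hT2 := suffix_cast p negs (j+1) (by omega)
  have hP1 := prefix_cast p dens j (by omega)
  have hP2 := suffix_cast p dens (j+1) (by omega)
  -- A's denominator fold written back as dens.getD j 0
  rw [← hdenF j (by omega)]
  simp only [Int.cast_mul, cast_pymod]
  rw [hnumA, hT1, hT2, hP1, hP2]
  set TP := ((negs.take j).map (Int.cast : Int → ZMod p.natAbs)).prod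
  set TD := ((negs.drop (j+1)).map (Int.cast : Int → ZMod p.natAbs)).prod
  set P1 := ((dens.take j).map (Int.cast : Int → ZMod p.natAbs)).prod
  set P2 := ((dens.drop (j+1)).map (Int.cast : Int → ZMod p.natAbs)).prod
  set I := ((pyInvMod (dens.getD j 0) p : Int) : ZMod p.natAbs)
  set IA := ((pyInvMod ((prefixProds p dens 1).getD xs.length 0) p : Int) : ZMod p.natAbs)
  set dj := ((dens.getD j 0 : Int) : ZMod p.natAbs)
  rw [hsplit] at e2
  linear_combination (TP * TD * P1 * P2 * IA) * e1 - (TP * TD * I) * e2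

-- ===== VERDICT (by name: the statement is the Claim_ definition above) =====
theorem reconstruct_secret_spec : Claim_equal_reconstruct_secret := by
  intro shares prime hdom hpre
  obtain ⟨hp, hlen2, hgcd⟩ := hpre
  unfold Spec_reconstruct_secret
  simp only [reconstruct_secret, reconstruct_secret_alt, List.length_map]
  apply PySem.List.foldl_congr_mem
  intro acc j hj
  have hjn : j < shares.length := List.mem_range.mp hj
  have hy : (shares.map Prod.snd).getD j 0 = (shares.getD j (0,0)).2 := by
    simpa using List.getD_map shares ((0,0) : Int × Int) (n := j) Prod.snd
  rw [hy]
  rw [basis_eq prime hp (shares.map Prod.fst) shares.length (by simp) _ _ rfl rfl j hjn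
    (fun k hk => hgcd k hk)]
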